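/- GENERATED by farm/worked/mk_tree_copies.py from farm/worked/error/Proof.lean (a worked proof of the farm's unit `error`,
   accepted by the verdict) — do not edit. -/
import Asan.CheckWalk
import Vorbis.Spec.Units.error

open X86 X86.User Asan Vorbis

set_option maxRecDepth 4000
set_option maxHeartbeats 4000000

/-- `error(f, e)` satisfies its contract: one check call, one 4-byte store through `f`, straight-line code. -/
theorem Vorbis.Spec.Worked.error_ok : Vorbis.Spec.error.Statement := by
  intro Lay hLay μ hμ u₀ hcode hstore4 others frames u ret he hpre
  v_entry he
  obtain ⟨hsh, hlive⟩ := hpre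
  -- where `*f` is: one arithmetic fact (inside the data space, off the text, off this function's stack)
  have hsp := hsh.rsp
  have hwhere := hlive.where_ hsh.inv hsh.offText (by decide)
  simp only [Vorbis.Off.sizeof.stb_vorbis] at hwhere
  u_walk hcode [hμ.vendor] span [Vorbis.L.textLo, Vorbis.L.textHi] side (v_side)
  · -- the check of the store: `f->error` lies inside `*f`; the three stack stores so far did not touch the shadow
    have hun : ShadowUntouched u.mem s_103d12.mem := by v_untouched
    refine hlive.accSmall hsh.inv hun _ 4 (by decide) (by u_omega) ?_
    simp only [Vorbis.Off.sizeof.stb_vorbis]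
    u_omega
  · -- the state after the `ret`: the contract's `Returned`
    refine ReachVia.done ?_
    v_returned
    refine ⟨w_rax, by v_untouched, ?_⟩
    -- the value stored: the low 32 bits of esi
    rw [w_mem, Mem.readLE_writeLE_same _ _ _ _ (by decide), Asan.part32_toNat]
    omega
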